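-- pv_equiv track=rewrite | github.com/ROsinesss/BNU-old-raven | backend/utils/cas_des.py | str_to_bt
-- ===== SOURCE A (Python) =====
-- def str_to_bt(s: str) -> list[int]:
--     """将字符串（<=4字符）转为 64-bit 数组"""
--     bt = [0] * 64
--     length = len(s)
--     for i in range(min(length, 4)):
--         k = ord(s[i])
--         for j in range(16):
--             pw = 1 << (15 - j)
--             bt[16 * i + j] = (k // pw) % 2
--     # 剩余位置填 0（已初始化）
--     return bt
-- ===== SOURCE B (Python) =====
-- def str_to_bt(s: str) -> list[int]:
--     """将字符串（<=4字符）转为 64-bit 数组"""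
--     num = 0
--     for i in range(min(len(s), 4)):
--         num |= (ord(s[i]) & 0xFFFF) << (16 * (3 - i))
--     return [(num >> (63 - idx)) & 1 for idx in range(64)]
-- ===== Notes on version B (the rewrite author's own statement) =====
-- stated objective: alternative
-- what changed: B packs the (up to 4) character codes, masked to 16 bits, into a single 64-bit integer with shift-or, then extracts all 64 bits in one flat shift-and-mask pass, replacing A's nested per-character/per-bit loop that computes each bit with a power and writes it into a preallocated 64-slot array.
import Mathlib
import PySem

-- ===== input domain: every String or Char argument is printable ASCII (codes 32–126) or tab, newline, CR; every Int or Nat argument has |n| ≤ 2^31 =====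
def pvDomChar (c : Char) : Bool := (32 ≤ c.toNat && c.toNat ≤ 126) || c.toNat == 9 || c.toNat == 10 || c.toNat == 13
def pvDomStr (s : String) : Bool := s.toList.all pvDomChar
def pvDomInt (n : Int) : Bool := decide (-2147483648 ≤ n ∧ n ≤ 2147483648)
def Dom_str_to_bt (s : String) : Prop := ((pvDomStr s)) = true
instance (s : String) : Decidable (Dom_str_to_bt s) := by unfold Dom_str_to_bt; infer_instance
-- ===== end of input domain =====

-- B packs the ≤4 characters' 16-bit codes into one 64-bit integer and extracts all
-- 64 bits in a single flat pass, instead of A's nested per-char/per-bit power arithmetic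
-- writing into a preallocated array (objective: alternative decomposition, same cost).

-- ===== PORT A =====
def str_to_bt (s : String) : List Int :=
  let bt : List Int := List.replicate 64 0
  let cs := s.toList
  let length := cs.length
  (List.range (min length 4)).foldl (fun bt i =>
    let k : Int := ((cs.getD i ' ').toNat : Int)   -- ord(s[i]); index always in range here
    (List.range 16).foldl (fun bt j =>
      let pw : Int := ((1 <<< (15 - j) : Nat) : Int)   -- 1 << (15 - j), nonnegative
      bt.set (16 * i + j) (PySem.Int.mod (PySem.Int.floordiv k pw) 2)) bt) bt

-- ===== PORT B =====
def str_to_bt_alt (s : String) : List Int :=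
  let cs := s.toList
  let num : Int :=
    (List.range (min cs.length 4)).foldl (fun num i =>
      PySem.Int.bor num ((PySem.Int.band ((cs.getD i ' ').toNat : Int) 0xFFFF) <<< (16 * (3 - i)))) 0
  (List.range 64).map (fun (idx : Nat) => PySem.Int.band (num >>> (63 - idx)) 1)

-- ===== PRECONDITION & SPEC =====
def Spec_str_to_bt (s : String) (out : List Int) : Prop := out = str_to_bt_alt s
instance (s : String) (out : List Int) : Decidable (Spec_str_to_bt s out) := by unfold Spec_str_to_bt; infer_instance

-- ===== CLAIM (what is proved, stated in full; the proofs are below) =====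
def Claim_equal_str_to_bt : Prop := ∀ (s : String), Dom_str_to_bt s → Spec_str_to_bt s (str_to_bt s)

-- ===== LEMMAS AND PROOFS =====

-- the single bit A stores at inner-loop step j (p = 15 - j)
def bitA (k p : Nat) : Int :=
  PySem.Int.mod (PySem.Int.floordiv (k : Int) ((1 <<< p : Nat) : Int)) 2

-- A's inner loop over j for character slot i
def innerA (cs : List Char) (i : Nat) (bt : List Int) : List Int :=
  (List.range 16).foldl (fun bt j =>
    bt.set (16 * i + j)
      (PySem.Int.mod (PySem.Int.floordiv (((cs.getD i ' ').toNat : Int)) ((1 <<< (15 - j) : Nat) : Int)) 2)) bt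

-- A's outer loop
def outerA (cs : List Char) (n : Nat) : List Int :=
  (List.range n).foldl (fun bt i => innerA cs i bt) (List.replicate 64 0)

lemma strA_eq (s : String) : str_to_bt s = outerA s.toList (min s.toList.length 4) := rfl

-- B's packed integer, on the Nat side
def numN (cs : List Char) (n : Nat) : Nat :=
  (List.range n).foldl (fun num i => num ||| (((cs.getD i ' ').toNat &&& 65535) <<< (16 * (3 - i)))) 0

def numB (cs : List Char) (n : Nat) : Int :=
  (List.range n).foldl (fun num i =>
    PySem.Int.bor num ((PySem.Int.band ((cs.getD i ' ').toNat : Int) 0xFFFF) <<< (16 * (3 - i)))) 0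

lemma strB_eq (s : String) :
    str_to_bt_alt s =
      (List.range 64).map (fun (idx : Nat) =>
        PySem.Int.band (numB s.toList (min s.toList.length 4) >>> (63 - idx)) 1) := rfl

lemma numB_eq_numN (cs : List Char) (n : Nat) : numB cs n = ((numN cs n : Nat) : Int) := by
  induction n with
  | zero => simp [numB, numN]
  | succ m ih =>
    rw [numB, numN, List.range_succ, List.foldl_append, List.foldl_append,
      List.foldl_cons, List.foldl_cons, List.foldl_nil, List.foldl_nil,
      ← numB, ← numN, ih]
    rw [show ((65535 : Int)) = ((65535 : Nat) : Int) by norm_num,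
      PySem.Int.band_natCast, ← Int.natCast_shiftLeft, PySem.Int.bor_natCast]

lemma foldl_set_length (l : List Nat) (f : Nat → Nat) (g : Nat → Int) (bt : List Int) :
    (l.foldl (fun bt j => bt.set (f j) (g j)) bt).length = bt.length := by
  induction l generalizing bt with
  | nil => rfl
  | cons x xs ih => rw [List.foldl_cons, ih, List.length_set]

lemma innerA_length (cs : List Char) (i : Nat) (bt : List Int) :
    (innerA cs i bt).length = bt.length :=
  foldl_set_length (List.range 16) (fun j => 16 * i + j) _ bt

lemma outerA_length (cs : List Char) (n : Nat) : (outerA cs n).length = 64 := by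
  induction n with
  | zero => simp [outerA]
  | succ m ih =>
    rw [outerA, List.range_succ, List.foldl_append, List.foldl_cons, List.foldl_nil, ← outerA]
    rw [innerA_length, ih]

-- A's inner loop truncated to its first m steps
def innerAux (cs : List Char) (i m : Nat) (bt : List Int) : List Int :=
  (List.range m).foldl (fun bt j =>
    bt.set (16 * i + j)
      (PySem.Int.mod (PySem.Int.floordiv (((cs.getD i ' ').toNat : Int)) ((1 <<< (15 - j) : Nat) : Int)) 2)) bt

lemma innerAux_length (cs : List Char) (i m : Nat) (bt : List Int) :
    (innerAux cs i m bt).length = bt.length :=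
  foldl_set_length (List.range m) (fun j => 16 * i + j) _ bt

lemma innerAux_get (cs : List Char) (i : Nat) (bt : List Int) (idx : Nat) (m : Nat)
    (hbt : bt.length = 64) (hidx : idx < 64) (hm : m ≤ 16) :
    (innerAux cs i m bt)[idx]? =
      if 16 * i ≤ idx ∧ idx < 16 * i + m then
        some (bitA (cs.getD i ' ').toNat (15 - (idx - 16 * i)))
      else bt[idx]? := by
  induction m with
  | zero =>
    rw [innerAux, List.range_zero, List.foldl_nil, if_neg (by omega)]
  | succ p ih =>
    rw [innerAux, List.range_succ, List.foldl_append, List.foldl_cons, List.foldl_nil, ← innerAux]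
    rw [List.getElem?_set, innerAux_length, hbt]
    by_cases h : 16 * i + p = idx
    · rw [if_pos h, if_pos (by omega), if_pos (by omega)]
      rw [show idx - 16 * i = p from by omega]
      rfl
    · rw [if_neg h, ih (by omega)]
      by_cases h2 : 16 * i ≤ idx ∧ idx < 16 * i + p
      · rw [if_pos h2, if_pos (by omega)]
      · rw [if_neg h2, if_neg (by omega)]

lemma innerA_get (cs : List Char) (i : Nat) (bt : List Int) (idx : Nat)
    (hbt : bt.length = 64) (hidx : idx < 64) :
    (innerA cs i bt)[idx]? =
      if 16 * i ≤ idx ∧ idx < 16 * i + 16 then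
        some (bitA (cs.getD i ' ').toNat (15 - (idx - 16 * i)))
      else bt[idx]? :=
  innerAux_get cs i bt idx 16 hbt hidx (by omega)

lemma outerA_get (cs : List Char) (n : Nat) (idx : Nat) (hn : n ≤ 4) (hidx : idx < 64) :
    (outerA cs n)[idx]? =
      some (if idx < 16 * n then bitA (cs.getD (idx / 16) ' ').toNat (15 - idx % 16) else 0) := by
  induction n with
  | zero =>
    rw [outerA]
    simp only [List.range_zero, List.foldl_nil]
    rw [List.getElem?_replicate, if_pos hidx]
    simp
  | succ m ih =>
    rw [outerA, List.range_succ, List.foldl_append, List.foldl_cons, List.foldl_nil, ← outerA]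
    rw [innerA_get cs m _ idx (outerA_length cs m) hidx]
    by_cases h : 16 * m ≤ idx ∧ idx < 16 * m + 16
    · rw [if_pos h]
      have h1 : idx / 16 = m := by omega
      have h2 : 15 - (idx - 16 * m) = 15 - idx % 16 := by omega
      rw [h1, h2, if_pos (by omega)]
    · rw [if_neg h, ih (by omega)]
      by_cases h2 : idx < 16 * m
      · rw [if_pos h2, if_pos (by omega)]
      · rw [if_neg h2, if_neg (by omega)]

lemma numN_testBit (cs : List Char) (n q : Nat) (hn : n ≤ 4) (hq : q < 64) :
    (numN cs n).testBit q =
      if 64 - 16 * n ≤ q then ((cs.getD (3 - q / 16) ' ').toNat &&& 65535).testBit (q % 16)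
      else false := by
  induction n with
  | zero => simp [numN]; omega
  | succ m ih =>
    rw [numN, List.range_succ, List.foldl_append, List.foldl_cons, List.foldl_nil, ← numN]
    rw [Nat.testBit_lor, Nat.testBit_shiftLeft, ih (by omega)]
    by_cases h1 : 64 - 16 * m ≤ q
    · -- bit q lies in an earlier character's slot; the new chunk contributes nothing
      rw [if_pos h1, if_pos (by omega)]
      have hfalse : ((cs.getD m ' ').toNat &&& 65535).testBit (q - 16 * (3 - m)) = false := by
        apply Nat.testBit_lt_two_pow
        calc (cs.getD m ' ').toNat &&& 65535 < 65536 := by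
              have := Nat.and_le_right (n := (cs.getD m ' ').toNat) (m := 65535); omega
          _ ≤ 2 ^ (q - 16 * (3 - m)) := by
              have h16 : 16 ≤ q - 16 * (3 - m) := by omega
              calc (65536 : Nat) = 2 ^ 16 := by norm_num
                _ ≤ 2 ^ (q - 16 * (3 - m)) := Nat.pow_le_pow_right (by norm_num) h16
      rw [hfalse, Bool.and_false, Bool.or_false]
    · rw [if_neg h1, Bool.false_or]
      by_cases h2 : 64 - 16 * (m + 1) ≤ q
      · -- bit q lies exactly in the new character's slot
        rw [if_pos h2]
        have hge : (q ≥ 16 * (3 - m)) = True := by simp; omega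
        have hq16 : q / 16 = 3 - m := by omega
        have hqm : q - 16 * (3 - m) = q % 16 := by omega
        simp only [hge, decide_true, Bool.true_and, hqm, hq16]
        have : 3 - (3 - m) = m := by omega
        rw [this]
      · -- bit q is below every slot written so far
        rw [if_neg h2]
        have : (q ≥ 16 * (3 - m)) = False := by simp; omega
        simp only [this, decide_false, Bool.false_and]

lemma mod_two_cast (k p : Nat) :
    PySem.Int.mod ((k / (1 <<< p) : Nat) : Int) 2 = ((k / (1 <<< p) % 2 : Nat) : Int) := by
  exact_mod_cast PySem.Int.mod_natCast (k / (1 <<< p)) 2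

-- converting A's stored bit to a testBit, for codes < 2^16
lemma bitA_eq_testBit (k p : Nat) (hk : k < 65536) :
    bitA k p = (((if (k &&& 65535).testBit p then 1 else 0 : Nat) : Int)) := by
  have hmask : k &&& 65535 = k := by
    have := Nat.and_two_pow_sub_one_eq_mod k 16
    norm_num at this
    rw [this, Nat.mod_eq_of_lt hk]
  rw [hmask, bitA, PySem.Int.floordiv_natCast k (1 <<< p)]
  rw [show PySem.Int.mod ((k / (1 <<< p) : Nat) : Int) 2 = ((k / (1 <<< p) % 2 : Nat) : Int) from
    mod_two_cast k p]
  congr 1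
  rw [Nat.testBit_eq_decide_div_mod_eq, Nat.shiftLeft_eq, one_mul]
  rcases Nat.mod_two_eq_zero_or_one (k / 2 ^ p) with h | h <;> simp [h]

-- converting B's extracted bit to a testBit
lemma bandB_eq_testBit (m q : Nat) :
    PySem.Int.band (((m : Nat) : Int) >>> q) 1 = ((if m.testBit q then 1 else 0 : Nat) : Int) := by
  rw [← Int.natCast_shiftRight]
  rw [show PySem.Int.band ((m >>> q : Nat) : Int) 1 = ((m >>> q &&& 1 : Nat) : Int) from
    by exact_mod_cast PySem.Int.band_natCast (m >>> q) 1]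
  congr 1
  rw [Nat.testBit_eq_decide_div_mod_eq, Nat.shiftRight_eq_div_pow, Nat.and_one_is_mod]
  rcases Nat.mod_two_eq_zero_or_one (m / 2 ^ q) with h | h <;> simp [h]

-- ===== VERDICT (by name: the statement is the Claim_ definition above) =====
theorem str_to_bt_spec : Claim_equal_str_to_bt := by
  intro s hdom
  unfold Spec_str_to_bt
  rw [strA_eq, strB_eq]
  have hall : ∀ c ∈ s.toList, c.toNat < 65536 := by
    intro c hc
    have := List.all_eq_true.mp hdom _ hc
    simp [pvDomChar] at this
    omega
  generalize s.toList = cs at hall ⊢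
  have hn4 : min cs.length 4 ≤ 4 := by omega
  apply List.ext_getElem?
  intro idx
  by_cases hidx : idx < 64
  · rw [outerA_get cs (min cs.length 4) idx hn4 hidx]
    rw [List.getElem?_map, List.getElem?_range hidx]
    simp only [Option.map_some]
    rw [numB_eq_numN, bandB_eq_testBit]
    have hbitq := numN_testBit cs (min cs.length 4) (63 - idx) hn4 (by omega)
    by_cases h : idx < 16 * min cs.length 4
    · rw [if_pos (show 64 - 16 * min cs.length 4 ≤ 63 - idx by omega)] at hbitq
      have hchar : cs.getD (3 - (63 - idx) / 16) ' ' = cs.getD (idx / 16) ' ' := by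
        congr 1; omega
      have hbit : (63 - idx) % 16 = 15 - idx % 16 := by omega
      rw [hchar, hbit] at hbitq
      rw [hbitq, if_pos h]
      have hin : idx / 16 < cs.length := by omega
      have hdomc : (cs.getD (idx / 16) ' ').toNat < 65536 := by
        apply hall
        rw [List.getD_eq_getElem cs ' ' hin]
        exact List.getElem_mem hin
      rw [bitA_eq_testBit _ _ hdomc]
    · rw [if_neg (show ¬ (64 - 16 * min cs.length 4 ≤ 63 - idx) by omega)] at hbitq
      rw [hbitq, if_neg h]
      simp
  · have hA : (outerA cs (min cs.length 4))[idx]? = none := by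
      rw [List.getElem?_eq_none_iff, outerA_length]; omega
    have hB : ((List.range 64).map (fun (i : Nat) =>
        PySem.Int.band (numB cs (min cs.length 4) >>> (63 - i)) 1))[idx]? = none := by
      rw [List.getElem?_eq_none_iff]
      simp
      omega
    rw [hA, hB]
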